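-- pv_equiv track=rewrite | github.com/seanwangsalad/mpnn-caliby | inverse_fold.py | collapse_positions
-- ===== SOURCE A (Python) =====
-- def collapse_positions(chain_id: str, positions: list[int]) -> list[str]:
--     if not positions:
--         return []
--
--     collapsed: list[str] = []
--     start = prev = positions[0]
--     for position in positions[1:]:
--         if position == prev + 1:
--             prev = position
--             continue
--         collapsed.append(f"{chain_id}{start}" if start == prev else f"{chain_id}{start}-{prev}")
--         start = prev = position
--     collapsed.append(f"{chain_id}{start}" if start == prev else f"{chain_id}{start}-{prev}")
--     return collapsed
-- ===== SOURCE B (Python) =====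
-- from itertools import groupby
--
--
-- def collapse_positions(chain_id: str, positions: list[int]) -> list[str]:
--     if not positions:
--         return []
--     out = []
--     for _, group in groupby(enumerate(positions), key=lambda iv: iv[1] - iv[0]):
--         run = [v for _, v in group]
--         first, last = run[0], run[-1]
--         out.append(f"{chain_id}{first}" if first == last else f"{chain_id}{first}-{last}")
--     return out
-- ===== Notes on version B (the rewrite author's own statement) =====
-- stated objective: idiomatic
-- what changed: Replaces A's interleaved start/prev accumulator loop with itertools.groupby over enumerate(positions) keyed by value-minus-index, so maximal consecutive runs are grouped first and formatted in a separate pass.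
import Mathlib
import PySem

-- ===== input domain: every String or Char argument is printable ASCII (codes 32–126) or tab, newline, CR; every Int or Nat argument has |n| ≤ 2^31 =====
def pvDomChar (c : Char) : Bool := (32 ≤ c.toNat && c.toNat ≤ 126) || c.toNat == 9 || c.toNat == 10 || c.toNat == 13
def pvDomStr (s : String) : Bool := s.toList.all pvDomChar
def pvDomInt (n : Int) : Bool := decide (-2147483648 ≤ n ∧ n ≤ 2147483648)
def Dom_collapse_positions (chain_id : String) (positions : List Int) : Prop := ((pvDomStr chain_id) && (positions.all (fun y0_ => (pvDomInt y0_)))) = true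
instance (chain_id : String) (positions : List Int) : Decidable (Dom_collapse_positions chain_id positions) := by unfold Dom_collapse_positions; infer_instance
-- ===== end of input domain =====

-- B replaces A's interleaved start/prev single pass by itertools.groupby on value-minus-index,
-- grouping maximal consecutive runs first and formatting each group in a second pass (objective: idiomatic).

-- ===== PORT A =====
-- f"{chain_id}{start}" / f"{chain_id}{start}-{prev}"
def pvFmtA (chain_id : String) (start prev : Int) : String :=
  if start = prev then chain_id ++ PySem.Int.toStr start
  else chain_id ++ PySem.Int.toStr start ++ "-" ++ PySem.Int.toStr prev

def collapse_positions (chain_id : String) (positions : List Int) : List String :=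
  match positions with
  | [] => []                                   -- if not positions: return []
  | p0 :: rest =>                              -- start = prev = positions[0]; loop over positions[1:]
    let st := rest.foldl (fun (st : List String × Int × Int) position =>
      let (collapsed, start, prev) := st
      if position = prev + 1 then (collapsed, start, position)
      else (collapsed ++ [pvFmtA chain_id start prev], position, position))
      ([], p0, p0)
    st.1 ++ [pvFmtA chain_id st.2.1 st.2.2]

-- ===== PORT B =====
-- itertools.groupby(enumerate(positions), key = value - index): maximal prefix with the same key,
-- then the rest; groups are (pivot :: takeWhile key-equal), as groupby yields them.
def pvRunsB : List (Int × Int) → List (List (Int × Int))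
  | [] => []
  | x :: xs =>
    (x :: xs.takeWhile (fun y => y.2 - y.1 = x.2 - x.1)) ::
      pvRunsB (xs.dropWhile (fun y => y.2 - y.1 = x.2 - x.1))
termination_by l => l.length
decreasing_by
  simpa using Nat.lt_succ_of_le (List.length_dropWhile_le _ _)

def collapse_positions_alt (chain_id : String) (positions : List Int) : List String :=
  if positions = [] then []
  else
    (pvRunsB (PySem.List.enumerate positions)).map (fun run =>
      let vals := run.map (·.2)
      let first := vals.headD 0
      let last := vals.getLastD 0
      if first = last then chain_id ++ PySem.Int.toStr first
      else chain_id ++ PySem.Int.toStr first ++ "-" ++ PySem.Int.toStr last)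

-- ===== PRECONDITION & SPEC =====
def Spec_collapse_positions (chain_id : String) (positions : List Int) (out : List String) : Prop := out = collapse_positions_alt chain_id positions
instance (chain_id : String) (positions : List Int) (out : List String) : Decidable (Spec_collapse_positions chain_id positions out) := by unfold Spec_collapse_positions; infer_instance

-- ===== CLAIM (what is proved, stated in full; the proofs are below) =====
def Claim_equal_collapse_positions : Prop := ∀ (chain_id : String) (positions : List Int), Dom_collapse_positions chain_id positions → Spec_collapse_positions chain_id positions (collapse_positions chain_id positions)

-- ===== LEMMAS AND PROOFS =====

-- Common reference form: split the value list into maximal +1-step runs.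
def pvGrab : Int → List Int → List Int × List Int
  | _, [] => ([], [])
  | p, v :: vs => if v = p + 1 then let g := pvGrab v vs; (v :: g.1, g.2) else ([], v :: vs)

theorem pvGrab_snd_length (p : Int) (vs : List Int) : (pvGrab p vs).2.length ≤ vs.length := by
  induction vs generalizing p with
  | nil => simp [pvGrab]
  | cons v vs ih =>
    simp only [pvGrab]
    split
    · exact le_trans (ih v) (Nat.le_succ _)
    · simp

def pvRuns : List Int → List (List Int)
  | [] => []
  | v :: vs =>
    let g := pvGrab v vs
    (v :: g.1) :: pvRuns g.2
termination_by l => l.length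
decreasing_by
  simpa using Nat.lt_succ_of_le (pvGrab_snd_length _ _)

-- last of a nonempty run, carried head-first
def pvLastV : Int → List Int → Int
  | p, [] => p
  | _, v :: vs => pvLastV v vs

def pvFmtG (chain_id : String) : List Int → String
  | [] => ""
  | v :: vs => pvFmtA chain_id v (pvLastV v vs)

-- ---- A equals the reference form ----
theorem pvA_loop (chain_id : String) (rest : List Int) (collapsed : List String)
    (start prev : Int) :
    (let st := rest.foldl (fun (st : List String × Int × Int) position =>
        let (collapsed, start, prev) := st
        if position = prev + 1 then (collapsed, start, position)
        else (collapsed ++ [pvFmtA chain_id start prev], position, position))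
        (collapsed, start, prev)
     st.1 ++ [pvFmtA chain_id st.2.1 st.2.2]) =
    collapsed ++ pvFmtA chain_id start (pvLastV prev (pvGrab prev rest).1)
      :: (pvRuns (pvGrab prev rest).2).map (pvFmtG chain_id) := by
  induction rest generalizing collapsed start prev with
  | nil => simp [pvGrab, pvRuns, pvLastV]
  | cons v vs ih =>
    by_cases h : v = prev + 1
    · simp only [List.foldl_cons, if_pos h, pvGrab]
      rw [ih]
      simp [h, pvLastV]
    · simp only [List.foldl_cons, if_neg h, pvGrab]
      rw [ih]
      simp [pvRuns, pvLastV, pvFmtG]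

theorem pvA_eq (chain_id : String) (positions : List Int) :
    collapse_positions chain_id positions = (pvRuns positions).map (pvFmtG chain_id) := by
  cases positions with
  | nil => simp [collapse_positions, pvRuns]
  | cons v vs =>
    show (let st := vs.foldl _ ([], v, v); st.1 ++ [pvFmtA chain_id st.2.1 st.2.2]) = _
    rw [pvA_loop]
    simp [pvRuns, pvFmtG]

-- ---- B equals the reference form ----
theorem pvTakeDrop_enum (vs : List Int) (i p c : Int) (hc : c = p - i) :
    (PySem.List.enumerate vs (i + 1)).takeWhile (fun y => y.2 - y.1 = c)
      = PySem.List.enumerate (pvGrab p vs).1 (i + 1) ∧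
    (PySem.List.enumerate vs (i + 1)).dropWhile (fun y => y.2 - y.1 = c)
      = PySem.List.enumerate (pvGrab p vs).2 (i + 1 + (pvGrab p vs).1.length) := by
  induction vs generalizing i p c with
  | nil => simp [pvGrab, PySem.List.enumerate_nil]
  | cons v vs ih =>
    by_cases h : v = p + 1
    · have hk : v - (i + 1) = c := by omega
      have := ih (i + 1) v (c := c) (by omega)
      simp only [PySem.List.enumerate_cons, List.takeWhile_cons, List.dropWhile_cons,
        pvGrab, if_pos h, hk]
      constructor
      · simp [this.1]
      · rw [this.2]
        rw [if_pos (by simp)]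
        congr 1
        simp only [List.length_cons]
        push_cast
        omega
    · have hk : ¬ (v - (i + 1) = c) := by omega
      simp only [PySem.List.enumerate_cons, List.takeWhile_cons, List.dropWhile_cons,
        pvGrab, if_neg h]
      constructor
      · simp [hk, PySem.List.enumerate_nil]
      · simp only [hk, decide_false, Bool.false_eq_true, if_false]
        simp

theorem pvMapSnd_enum (vs : List Int) (i : Int) :
    (PySem.List.enumerate vs i).map (·.2) = vs := PySem.List.map_snd_enumerate vs i

theorem pvLastV_getLastD (v : Int) (vs : List Int) : (v :: vs).getLastD 0 = pvLastV v vs := by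
  induction vs generalizing v with
  | nil => simp [pvLastV]
  | cons w ws ih => simpa [pvLastV] using ih w

theorem pvB_runs (chain_id : String) (vs : List Int) (i : Int) :
    (pvRunsB (PySem.List.enumerate vs i)).map (fun run =>
      let vals := run.map (·.2)
      let first := vals.headD 0
      let last := vals.getLastD 0
      if first = last then chain_id ++ PySem.Int.toStr first
      else chain_id ++ PySem.Int.toStr first ++ "-" ++ PySem.Int.toStr last)
    = (pvRuns vs).map (pvFmtG chain_id) := by
  cases vs with
  | nil => simp [pvRuns, PySem.List.enumerate_nil, pvRunsB]
  | cons v vs =>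
    have htd := pvTakeDrop_enum vs i v (v - i) rfl
    rw [PySem.List.enumerate_cons, pvRunsB]
    simp only [List.map_cons]
    rw [htd.1, htd.2, pvB_runs chain_id (pvGrab v vs).2 (i + 1 + (pvGrab v vs).1.length)]
    simp only [pvRuns]
    congr 1
    simp only [pvMapSnd_enum, pvFmtG, pvFmtA, List.headD_cons, pvLastV_getLastD]
termination_by vs.length
decreasing_by
  simpa using Nat.lt_succ_of_le (pvGrab_snd_length _ _)

theorem pvB_eq (chain_id : String) (positions : List Int) :
    collapse_positions_alt chain_id positions = (pvRuns positions).map (pvFmtG chain_id) := by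
  cases positions with
  | nil => simp [collapse_positions_alt, pvRuns]
  | cons v vs =>
    unfold collapse_positions_alt
    rw [if_neg (by simp)]
    exact pvB_runs chain_id (v :: vs) 0

-- ===== VERDICT (by name: the statement is the Claim_ definition above) =====
theorem collapse_positions_spec : Claim_equal_collapse_positions := by
  intro chain_id positions _
  unfold Spec_collapse_positions
  rw [pvA_eq, pvB_eq]
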